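-- pv_equiv track=rewrite | github.com/torkilv/adventofcode19 | 4/password-generator.py | two_adjacent_same
-- ===== SOURCE A (Python) =====
-- def two_adjacent_same(number):
--     prev = ""
--     prev_match = False
--     for i in str(number):
--         if i == prev:
--             prev_match = not prev_match
--         elif prev_match:
--             return True
--         prev = i
--     return False
-- ===== SOURCE B (Python) =====
-- def two_adjacent_same(number):
--     # build the list of (char, run-length) groups, then check all runs but the last
--     runs = []
--     for c in str(number):
--         if runs and runs[-1][0] == c:
--             runs[-1][1] += 1
--         else:
--             runs.append([c, 1])
--     return any(n % 2 == 0 for _, n in runs[:-1])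
-- ===== Notes on version B (the rewrite author's own statement) =====
-- stated objective: alternative
-- what changed: B first materialises the (char, run-length) groups of str(number) in one pass and then checks all groups except the last for an even length, replacing A's single scan that toggles a match flag and early-returns inside the loop.
import Mathlib
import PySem

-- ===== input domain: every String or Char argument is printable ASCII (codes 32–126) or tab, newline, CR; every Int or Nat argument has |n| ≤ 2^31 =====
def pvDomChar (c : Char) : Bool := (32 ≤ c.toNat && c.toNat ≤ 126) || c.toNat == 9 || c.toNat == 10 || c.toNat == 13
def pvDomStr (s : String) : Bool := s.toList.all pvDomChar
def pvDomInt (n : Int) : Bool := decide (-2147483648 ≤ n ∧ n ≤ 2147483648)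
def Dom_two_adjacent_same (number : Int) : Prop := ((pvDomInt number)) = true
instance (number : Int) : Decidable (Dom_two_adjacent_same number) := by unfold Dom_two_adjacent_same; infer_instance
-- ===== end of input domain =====

-- B builds the (char, run-length) groups of str(number) first and then checks all runs but
-- the last for an even length, instead of A's single toggling scan (objective: alternative).

-- ===== PORT A =====
-- the for-loop of A with early return; prev = "" is modelled as prev = none
def twoAdjLoop : List Char → Option Char → Bool → Bool
  | [], _, _ => false
  | c :: rest, prev, pm =>
    if prev = some c then twoAdjLoop rest (some c) (!pm)
    else if pm then true
    else twoAdjLoop rest (some c) false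

def two_adjacent_same (number : Int) : Bool :=
  twoAdjLoop (PySem.Int.toStr number).toList none false

-- ===== PORT B =====
-- Source B's run-building loop; the growing list `runs` is kept head-first (head = runs[-1]),
-- reversed when the scan ends — the same runs in the same order
def buildRuns : List Char → List (Char × Int) → List (Char × Int)
  | [], acc => acc.reverse
  | c :: rest, acc =>
    match acc with
    | (d, n) :: tl =>
      if d = c then buildRuns rest ((d, n + 1) :: tl)
      else buildRuns rest ((c, 1) :: (d, n) :: tl)
    | [] => buildRuns rest [(c, 1)]

def two_adjacent_same_alt (number : Int) : Bool :=
  let runs := buildRuns (PySem.Int.toStr number).toList []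
  -- runs[:-1] is List.dropLast; n % 2 with n ≥ 1 and divisor 2: Lean's Int % agrees with Python's here
  runs.dropLast.any (fun p => decide (p.2 % 2 = 0))

-- ===== PRECONDITION & SPEC =====
def Spec_two_adjacent_same (number : Int) (out : Bool) : Prop := out = two_adjacent_same_alt number
instance (number : Int) (out : Bool) : Decidable (Spec_two_adjacent_same number out) := by unfold Spec_two_adjacent_same; infer_instance

-- ===== CLAIM (what is proved, stated in full; the proofs are below) =====
def Claim_equal_two_adjacent_same : Prop := ∀ (number : Int), Dom_two_adjacent_same number → Spec_two_adjacent_same number (two_adjacent_same number)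

-- ===== LEMMAS AND PROOFS =====

-- the B-side check, as a function of the finished run list
def gRuns (rs : List (Char × Int)) : Bool := rs.dropLast.any (fun p => decide (p.2 % 2 = 0))

lemma gRuns_reverse_cons (p : Char × Int) (tl : List (Char × Int)) :
    gRuns ((p :: tl).reverse) = tl.any (fun q => decide (q.2 % 2 = 0)) := by
  simp [gRuns, List.any_reverse]

-- once the accumulator's tail holds an even run, B answers true whatever comes next
lemma buildRuns_even_tail : ∀ (l : List Char) (x : Char) (m : Int) (tl : List (Char × Int)),
    (∃ p ∈ tl, p.2 % 2 = 0) → gRuns (buildRuns l ((x, m) :: tl)) = true := by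
  intro l
  induction l with
  | nil =>
    intro x m tl ⟨p, hp, hev⟩
    rw [buildRuns, gRuns_reverse_cons]
    exact List.any_eq_true.mpr ⟨p, hp, by simpa using hev⟩
  | cons c rest ih =>
    intro x m tl h
    rw [buildRuns]
    by_cases hc : x = c
    · simp only [hc]
      exact ih c (m + 1) tl h
    · simp only [if_neg hc]
      exact ih c 1 ((x, m) :: tl) ⟨h.choose, List.mem_cons_of_mem _ h.choose_spec.1, h.choose_spec.2⟩

-- main invariant: mid-scan, A's toggle flag equals the parity of the current run length,
-- and every already-closed run (the accumulator's tail) has odd length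
lemma loop_eq_runs : ∀ (l : List Char) (c : Char) (n : Int) (tl : List (Char × Int)),
    (∀ p ∈ tl, p.2 % 2 = 1) →
    twoAdjLoop l (some c) (decide (n % 2 = 0)) = gRuns (buildRuns l ((c, n) :: tl)) := by
  intro l
  induction l with
  | nil =>
    intro c n tl hodd
    rw [twoAdjLoop, buildRuns, gRuns_reverse_cons]
    symm
    simp only [List.any_eq_false]
    intro p hp
    have := hodd p hp
    simp only [decide_eq_true_eq]
    omega
  | cons x rest ih =>
    intro c n tl hodd
    rw [twoAdjLoop, buildRuns]
    by_cases hc : c = x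
    · subst hc
      
      have hflip : (!decide (n % 2 = 0)) = decide ((n + 1) % 2 = 0) := by
        by_cases h : n % 2 = 0
        · have : ¬ (n + 1) % 2 = 0 := by omega
          simp [h, this]
        · have : (n + 1) % 2 = 0 := by omega
          simp [h, this]
      rw [if_pos rfl, if_pos rfl, hflip]
      exact ih c (n + 1) tl hodd
    · have hne : ¬ (some c = some x) := by simp [hc]
      simp only [if_neg hne, if_neg hc]
      by_cases hpar : n % 2 = 0
      · simp only [hpar, decide_true]
        exact (buildRuns_even_tail rest x 1 ((c, n) :: tl) ⟨(c, n), List.mem_cons_self, hpar⟩).symm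
      · simp only [hpar, decide_false, if_neg (by simp : ¬ (false = true))]
        have h1 : (false : Bool) = decide ((1 : Int) % 2 = 0) := by decide
        rw [h1]
        exact ih x 1 ((c, n) :: tl) (by
          intro p hp
          rcases List.mem_cons.mp hp with h | h
          · subst h; omega
          · exact hodd p h)

lemma starts_agree (l : List Char) : twoAdjLoop l none false = gRuns (buildRuns l []) := by
  cases l with
  | nil => rfl
  | cons c rest =>
    rw [twoAdjLoop, buildRuns]
    simp only [reduceCtorEq]
    have h1 : (false : Bool) = decide ((1 : Int) % 2 = 0) := by decide
    rw [h1]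
    exact loop_eq_runs rest c 1 [] (by intro p hp; simp at hp)

-- ===== VERDICT (by name: the statement is the Claim_ definition above) =====
theorem two_adjacent_same_spec : Claim_equal_two_adjacent_same := by
  intro number _
  unfold Spec_two_adjacent_same two_adjacent_same two_adjacent_same_alt
  exact starts_agree _
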